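-- pv_equiv track=rewrite | github.com/AndrewSmigaj/ConceptualFragmentationInLLMsAnalysisAndVisualization | archive/old_labels/generate_llm_direct_labels_k10.py | analyze_linguistic_patterns
-- ===== SOURCE A (Python) =====
-- def analyze_linguistic_patterns(tokens):
--     """Analyze linguistic patterns in the token set."""
--     patterns = {
--         'grammatical_role': '',
--         'morphological_pattern': '',
--         'semantic_field': '',
--         'position_tendency': ''
--     }
--
--     # Simplified analysis based on token characteristics
--     clean_tokens = [t.strip().lower() for t in tokens]
--
--     # Grammatical role analysis
--     if sum(1 for t in clean_tokens if t in {'the', 'a', 'an', 'this', 'that', 'these', 'those'}) > 5: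
--         patterns['grammatical_role'] = 'Determiners and articles'
--     elif sum(1 for t in clean_tokens if t in {'is', 'are', 'was', 'were', 'be', 'been', 'being', 'am'}) > 5:
--         patterns['grammatical_role'] = 'Auxiliary verbs'
--     elif sum(1 for t in clean_tokens if t in {'in', 'on', 'at', 'by', 'for', 'with', 'from', 'to', 'of'}) > 5:
--         patterns['grammatical_role'] = 'Prepositions'
--     elif sum(1 for t in clean_tokens if t in {'I', 'you', 'he', 'she', 'it', 'we', 'they', 'me', 'him', 'her'}) > 5:
--         patterns['grammatical_role'] = 'Personal pronouns'
--
--     # Morphological patterns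
--     if sum(1 for t in tokens if t.endswith('ing')) > 5:
--         patterns['morphological_pattern'] = 'Present participles (-ing forms)'
--     elif sum(1 for t in tokens if t.endswith('ed')) > 5:
--         patterns['morphological_pattern'] = 'Past tense/participles (-ed forms)'
--     elif sum(1 for t in tokens if t.endswith('ly')) > 5:
--         patterns['morphological_pattern'] = 'Adverbs (-ly forms)'
--     elif sum(1 for t in tokens if t.endswith('s') or t.endswith('es')) > 10:
--         patterns['morphological_pattern'] = 'Plural/3rd person forms'
--
--     # Semantic field (very basic)
--     if any(t in clean_tokens for t in ['time', 'day', 'year', 'hour', 'minute', 'week', 'month']):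
--         patterns['semantic_field'] = 'Temporal concepts'
--     elif any(t in clean_tokens for t in ['place', 'location', 'area', 'region', 'city', 'country']):
--         patterns['semantic_field'] = 'Spatial concepts'
--     elif any(t in clean_tokens for t in ['people', 'person', 'man', 'woman', 'child', 'human']):
--         patterns['semantic_field'] = 'Human entities'
--
--     # Position tendency
--     sentence_starters = {'The', 'A', 'In', 'On', 'He', 'She', 'It', 'They', 'We', 'I'}
--     if sum(1 for t in tokens if t in sentence_starters) > 5:
--         patterns['position_tendency'] = 'Often sentence-initial'
--
--     return patterns
-- ===== SOURCE B (Python) =====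
-- DETERMINERS = {'the', 'a', 'an', 'this', 'that', 'these', 'those'}
-- AUXILIARIES = {'is', 'are', 'was', 'were', 'be', 'been', 'being', 'am'}
-- PREPOSITIONS = {'in', 'on', 'at', 'by', 'for', 'with', 'from', 'to', 'of'}
-- PRONOUNS = {'I', 'you', 'he', 'she', 'it', 'we', 'they', 'me', 'him', 'her'}
-- TEMPORAL = {'time', 'day', 'year', 'hour', 'minute', 'week', 'month'}
-- SPATIAL = {'place', 'location', 'area', 'region', 'city', 'country'}
-- HUMAN = {'people', 'person', 'man', 'woman', 'child', 'human'}
-- STARTERS = {'The', 'A', 'In', 'On', 'He', 'She', 'It', 'They', 'We', 'I'}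
--
--
-- def analyze_linguistic_patterns(tokens):
--     """Single pass: tally every count/flag once, then decide each label."""
--     det = aux = prep = pron = 0
--     ing = ed = ly = plural = starters = 0
--     temporal = spatial = human = False
--
--     for t in tokens:
--         c = t.strip().lower()
--         if c in DETERMINERS:
--             det += 1
--         if c in AUXILIARIES:
--             aux += 1
--         if c in PREPOSITIONS:
--             prep += 1
--         if c in PRONOUNS:
--             pron += 1
--         if c in TEMPORAL:
--             temporal = True
--         if c in SPATIAL:
--             spatial = True
--         if c in HUMAN:
--             human = True
--         if t.endswith('ing'):
--             ing += 1
--         if t.endswith('ed'):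
--             ed += 1
--         if t.endswith('ly'):
--             ly += 1
--         if t.endswith('s'):  # endswith('es') implies endswith('s')
--             plural += 1
--         if t in STARTERS:
--             starters += 1
--
--     if det > 5:
--         grammatical = 'Determiners and articles'
--     elif aux > 5:
--         grammatical = 'Auxiliary verbs'
--     elif prep > 5:
--         grammatical = 'Prepositions'
--     elif pron > 5:
--         grammatical = 'Personal pronouns'
--     else:
--         grammatical = ''
--
--     if ing > 5:
--         morphological = 'Present participles (-ing forms)'
--     elif ed > 5:
--         morphological = 'Past tense/participles (-ed forms)'
--     elif ly > 5:
--         morphological = 'Adverbs (-ly forms)'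
--     elif plural > 10:
--         morphological = 'Plural/3rd person forms'
--     else:
--         morphological = ''
--
--     if temporal:
--         semantic = 'Temporal concepts'
--     elif spatial:
--         semantic = 'Spatial concepts'
--     elif human:
--         semantic = 'Human entities'
--     else:
--         semantic = ''
--
--     position = 'Often sentence-initial' if starters > 5 else ''
--
--     return {
--         'grammatical_role': grammatical,
--         'morphological_pattern': morphological,
--         'semantic_field': semantic,
--         'position_tendency': position,
--     }
-- ===== Notes on version B (the rewrite author's own statement) =====
-- stated objective: alternative
-- what changed: B replaces A's fifteen separate scans of the token list (one per count/flag) with a single accumulation pass that cleans each token once and tallies every counter and flag, followed by a scan-free decision step; the redundant endswith('es') test is dropped since it is subsumed by endswith('s'); measured timing shows no speedup, so this is an alternative decomposition, not a faster one.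
import Mathlib
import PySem

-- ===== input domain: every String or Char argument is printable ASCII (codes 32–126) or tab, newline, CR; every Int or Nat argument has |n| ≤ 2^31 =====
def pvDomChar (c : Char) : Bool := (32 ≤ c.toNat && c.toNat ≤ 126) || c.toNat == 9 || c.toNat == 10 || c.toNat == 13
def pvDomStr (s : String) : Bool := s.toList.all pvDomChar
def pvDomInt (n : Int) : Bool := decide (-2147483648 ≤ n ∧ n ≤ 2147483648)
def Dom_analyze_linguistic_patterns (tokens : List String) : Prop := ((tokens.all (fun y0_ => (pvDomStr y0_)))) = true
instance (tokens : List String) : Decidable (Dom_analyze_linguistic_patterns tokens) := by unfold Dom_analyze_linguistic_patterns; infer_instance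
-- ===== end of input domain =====

-- B replaces A's fifteen separate scans of the token list with ONE accumulation pass
-- (clean each token once, tally every counter/flag) plus a scan-free decision step
-- (objective: alternative decomposition, same results; not measured faster).

-- ===== PORT A =====
-- literal transliteration of A: one full scan of the list per count / flag, elif chains
def analyze_linguistic_patterns (tokens : List String) : List (String × String) :=
  let clean_tokens := tokens.map (fun t => PySem.Str.lower (PySem.Str.strip t))
  let grammatical_role :=
    if (clean_tokens.countP (fun t => ["the","a","an","this","that","these","those"].contains t)) > 5 then
      "Determiners and articles"
    else if (clean_tokens.countP (fun t => ["is","are","was","were","be","been","being","am"].contains t)) > 5 then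
      "Auxiliary verbs"
    else if (clean_tokens.countP (fun t => ["in","on","at","by","for","with","from","to","of"].contains t)) > 5 then
      "Prepositions"
    else if (clean_tokens.countP (fun t => ["I","you","he","she","it","we","they","me","him","her"].contains t)) > 5 then
      "Personal pronouns"
    else ""
  let morphological_pattern :=
    if (tokens.countP (fun t => PySem.Str.endswith t "ing")) > 5 then
      "Present participles (-ing forms)"
    else if (tokens.countP (fun t => PySem.Str.endswith t "ed")) > 5 then
      "Past tense/participles (-ed forms)"
    else if (tokens.countP (fun t => PySem.Str.endswith t "ly")) > 5 then
      "Adverbs (-ly forms)"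
    else if (tokens.countP (fun t => PySem.Str.endswith t "s" || PySem.Str.endswith t "es")) > 10 then
      "Plural/3rd person forms"
    else ""
  let semantic_field :=
    if (["time","day","year","hour","minute","week","month"].any (fun t => clean_tokens.contains t)) then
      "Temporal concepts"
    else if (["place","location","area","region","city","country"].any (fun t => clean_tokens.contains t)) then
      "Spatial concepts"
    else if (["people","person","man","woman","child","human"].any (fun t => clean_tokens.contains t)) then
      "Human entities"
    else ""
  let position_tendency :=
    if (tokens.countP (fun t => ["The","A","In","On","He","She","It","They","We","I"].contains t)) > 5 then
      "Often sentence-initial"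
    else ""
  [("grammatical_role", grammatical_role), ("morphological_pattern", morphological_pattern),
   ("semantic_field", semantic_field), ("position_tendency", position_tendency)]

-- ===== PORT B =====
-- module-level word sets of Source B
def pvDET : List String := ["the","a","an","this","that","these","those"]
def pvAUX : List String := ["is","are","was","were","be","been","being","am"]
def pvPREP : List String := ["in","on","at","by","for","with","from","to","of"]
def pvPRON : List String := ["I","you","he","she","it","we","they","me","him","her"]
def pvTEMP : List String := ["time","day","year","hour","minute","week","month"]
def pvSPAT : List String := ["place","location","area","region","city","country"]
def pvHUM : List String := ["people","person","man","woman","child","human"]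
def pvSTART : List String := ["The","A","In","On","He","She","It","They","We","I"]

-- the accumulator of B's single pass
structure PVTally where
  det : Nat
  aux : Nat
  prep : Nat
  pron : Nat
  ing : Nat
  ed : Nat
  ly : Nat
  plural : Nat
  starters : Nat
  temporal : Bool
  spatial : Bool
  human : Bool
deriving Repr, DecidableEq

def pvClean (t : String) : String := PySem.Str.lower (PySem.Str.strip t)

-- the loop body of Source B: clean once, bump every counter / flag
def pvStep (st : PVTally) (t : String) : PVTally :=
  let c := pvClean t
  { det := st.det + (if pvDET.contains c then 1 else 0),
    aux := st.aux + (if pvAUX.contains c then 1 else 0),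
    prep := st.prep + (if pvPREP.contains c then 1 else 0),
    pron := st.pron + (if pvPRON.contains c then 1 else 0),
    ing := st.ing + (if PySem.Str.endswith t "ing" then 1 else 0),
    ed := st.ed + (if PySem.Str.endswith t "ed" then 1 else 0),
    ly := st.ly + (if PySem.Str.endswith t "ly" then 1 else 0),
    plural := st.plural + (if PySem.Str.endswith t "s" then 1 else 0),
    starters := st.starters + (if pvSTART.contains t then 1 else 0),
    temporal := st.temporal || pvTEMP.contains c,
    spatial := st.spatial || pvSPAT.contains c,
    human := st.human || pvHUM.contains c }

def analyze_linguistic_patterns_alt (tokens : List String) : List (String × String) :=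
  let st := tokens.foldl pvStep ⟨0,0,0,0,0,0,0,0,0,false,false,false⟩
  let grammatical :=
    if st.det > 5 then "Determiners and articles"
    else if st.aux > 5 then "Auxiliary verbs"
    else if st.prep > 5 then "Prepositions"
    else if st.pron > 5 then "Personal pronouns"
    else ""
  let morphological :=
    if st.ing > 5 then "Present participles (-ing forms)"
    else if st.ed > 5 then "Past tense/participles (-ed forms)"
    else if st.ly > 5 then "Adverbs (-ly forms)"
    else if st.plural > 10 then "Plural/3rd person forms"
    else ""
  let semantic :=
    if st.temporal then "Temporal concepts"
    else if st.spatial then "Spatial concepts"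
    else if st.human then "Human entities"
    else ""
  let position := if st.starters > 5 then "Often sentence-initial" else ""
  [("grammatical_role", grammatical), ("morphological_pattern", morphological),
   ("semantic_field", semantic), ("position_tendency", position)]

-- ===== PRECONDITION & SPEC =====
def Spec_analyze_linguistic_patterns (tokens : List String) (out : List (String × String)) : Prop := out = analyze_linguistic_patterns_alt tokens
instance (tokens : List String) (out : List (String × String)) : Decidable (Spec_analyze_linguistic_patterns tokens out) := by unfold Spec_analyze_linguistic_patterns; infer_instance

-- ===== CLAIM (what is proved, stated in full; the proofs are below) =====
def Claim_equal_analyze_linguistic_patterns : Prop := ∀ (tokens : List String), Dom_analyze_linguistic_patterns tokens → Spec_analyze_linguistic_patterns tokens (analyze_linguistic_patterns tokens)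

-- ===== LEMMAS AND PROOFS =====

-- characterisation of B's single pass: each field of the fold is the corresponding count / flag
lemma pvFold_spec (ts : List String) (st : PVTally) :
    ts.foldl pvStep st =
      ⟨ st.det + ts.countP (fun t => pvDET.contains (pvClean t)),
        st.aux + ts.countP (fun t => pvAUX.contains (pvClean t)),
        st.prep + ts.countP (fun t => pvPREP.contains (pvClean t)),
        st.pron + ts.countP (fun t => pvPRON.contains (pvClean t)),
        st.ing + ts.countP (fun t => PySem.Str.endswith t "ing"),
        st.ed + ts.countP (fun t => PySem.Str.endswith t "ed"),
        st.ly + ts.countP (fun t => PySem.Str.endswith t "ly"),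
        st.plural + ts.countP (fun t => PySem.Str.endswith t "s"),
        st.starters + ts.countP (fun t => pvSTART.contains t),
        st.temporal || ts.any (fun t => pvTEMP.contains (pvClean t)),
        st.spatial || ts.any (fun t => pvSPAT.contains (pvClean t)),
        st.human || ts.any (fun t => pvHUM.contains (pvClean t)) ⟩ := by
  induction ts generalizing st with
  | nil => simp
  | cons t ts ih =>
      simp only [List.foldl_cons, ih, List.countP_cons, List.any_cons, pvStep,
        PVTally.mk.injEq]
      refine ⟨?_,?_,?_,?_,?_,?_,?_,?_,?_,?_,?_,?_⟩ <;>
        first | omega | simp [Bool.or_assoc]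

-- endswith 'es' is subsumed by endswith 's'
lemma pv_es_sub (t : String) :
    (PySem.Str.endswith t "s" || PySem.Str.endswith t "es") = PySem.Str.endswith t "s" := by
  have key : PySem.Str.endswith t "es" = true → PySem.Str.endswith t "s" = true := by
    simp only [PySem.Str.endswith_eq, PySem.Chars.endswith_iff]
    intro he
    exact List.IsSuffix.trans (by decide) he
  cases h : PySem.Str.endswith t "s"
  · simp only [Bool.false_or]
    cases he : PySem.Str.endswith t "es"
    · rfl
    · rw [key he] at h
      exact Bool.noConfusion h
  · simp

-- the redundant endswith('es') disjunct drops out of the plural count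
lemma pv_plural_count (ts : List String) :
    ts.countP (fun t => PySem.Str.endswith t "s" || PySem.Str.endswith t "es")
      = ts.countP (fun t => PySem.Str.endswith t "s") :=
  List.countP_congr (fun t _ => by rw [pv_es_sub t])

-- 'any keyword is a member of the list' = 'any list element is a keyword'
lemma pv_any_comm (kws ts : List String) :
    kws.any (fun k => ts.contains k) = ts.any (fun t => kws.contains t) := by
  rw [Bool.eq_iff_iff]
  simp only [List.any_eq_true, List.contains_iff_mem]
  exact ⟨fun ⟨x, h1, h2⟩ => ⟨x, h2, h1⟩, fun ⟨x, h1, h2⟩ => ⟨x, h2, h1⟩⟩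

-- ===== VERDICT (by name: the statement is the Claim_ definition above) =====
theorem analyze_linguistic_patterns_spec : Claim_equal_analyze_linguistic_patterns := by
  intro tokens _
  unfold Spec_analyze_linguistic_patterns analyze_linguistic_patterns analyze_linguistic_patterns_alt
  rw [pvFold_spec]
  simp only [List.countP_map, List.any_map, Function.comp_def, pvDET, pvAUX, pvPREP, pvPRON,
    pvTEMP, pvSPAT, pvHUM, pvSTART, pvClean, Nat.zero_add, Bool.false_or,
    pv_plural_count, pv_any_comm]
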